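-- pv_equiv track=rewrite | github.com/Kaos9001/kindi | cipher.py | autokey
-- ===== SOURCE A (Python) =====
-- alphabet_lower = "abcdefghijklmnopqrstuvwxyz"
--
-- alphabet_upper = "ABCDEFGHIJKLMNOPQRSTUVWXYZ"
--
-- def rot(ch, n):
--     if ch in alphabet_lower:
--         init_pos = 97
--     elif ch in alphabet_upper:
--         init_pos = 65
--     else:
--         return ch
--     pos = ord(ch) - init_pos + n
--     pos = pos % 26
--     nch = chr(pos+init_pos)
--
--     return nch
--
-- def to_number_key(text, key):
--     lower_key = key.lower()
--     number_key = []
--     for i in range(len(text)):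
--         key_pos = i % len(lower_key)
--         num = ord(lower_key[key_pos]) - ord("a")
--         number_key.append(num)
--     return number_key
--
-- def vigenere(text, key, arg):
--     number_key = []
--     if isinstance(key, int):
--         number_key = to_number_key(text, key)
--     if isinstance(key, str):
--         key = key.lower()
--         for i in range(len(text)):
--             pos = i % len(key)
--             c = key[pos]
--             number_key.append(ord(c) - ord("a"))
--     answer = ""
--     for i in range(len(text)):
--         if arg == "encode":
--             encry = number_key[i]
--         elif arg == "decode":
--             encry = - number_key[i]
--         answer += rot(text[i], encry)
--
--     return answer
--
-- def autokey(text, key, arg):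
--     if arg == "encode":
--         new_key = key + text
--         return vigenere(text, new_key, arg)
--     elif arg == "decode":
--         number_key = to_number_key(key, key)
--         answer = ""
--         for i in range(len(text)):
--             current = rot(text[i], -number_key[0])
--             answer += current
--             number_key.append(to_number_key(current, current)[0])
--             number_key.pop(0)
--         return answer
-- ===== SOURCE B (Python) =====
-- alphabet_lower = "abcdefghijklmnopqrstuvwxyz"
--
-- alphabet_upper = "ABCDEFGHIJKLMNOPQRSTUVWXYZ"
--
-- def rot(ch, n):
--     if ch in alphabet_lower:
--         init_pos = 97
--     elif ch in alphabet_upper: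
--         init_pos = 65
--     else:
--         return ch
--     return chr((ord(ch) - init_pos + n) % 26 + init_pos)
--
-- def autokey(text, key, arg):
--     if arg != "encode" and arg != "decode":
--         return None
--     enc = arg == "encode"
--     queue = [ord(c) - 97 for c in key.lower()]
--     out = []
--     for ch in text:
--         if enc:
--             queue.append(ord(ch.lower()) - 97)
--         k = queue.pop(0)
--         p = rot(ch, k if enc else -k)
--         out.append(p)
--         if not enc:
--             queue.append(ord(p.lower()) - 97)
--     return "".join(out)
-- ===== Notes on version B (the rewrite author's own statement) =====
-- stated objective: simpler
-- what changed: Replaces A's two separate paths (encode = concatenate key+text then run the two-pass vigenere table build; decode = rolling list with append/pop) by one streaming loop over the text that maintains the keystream as a single queue for both directions.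
import Mathlib
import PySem

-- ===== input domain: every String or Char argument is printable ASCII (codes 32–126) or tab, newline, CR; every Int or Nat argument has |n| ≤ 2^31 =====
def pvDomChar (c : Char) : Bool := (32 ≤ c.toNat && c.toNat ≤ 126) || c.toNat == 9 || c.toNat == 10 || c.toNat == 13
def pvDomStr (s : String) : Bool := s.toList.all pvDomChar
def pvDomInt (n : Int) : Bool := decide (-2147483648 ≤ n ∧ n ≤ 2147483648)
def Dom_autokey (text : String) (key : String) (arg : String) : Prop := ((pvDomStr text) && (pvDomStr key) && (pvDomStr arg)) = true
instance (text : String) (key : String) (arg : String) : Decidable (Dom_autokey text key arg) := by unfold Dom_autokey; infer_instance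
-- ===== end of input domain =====

-- B unifies encode and decode into one streaming pass over the text with a keystream queue,
-- replacing A's key+text concatenation and two-pass vigenere (objective: simpler decomposition).

-- ===== PORT A =====
-- shared character rotation: port of the module helper `rot` (used verbatim by both Pythons)
def alphabetLower : List Char := "abcdefghijklmnopqrstuvwxyz".toList
def alphabetUpper : List Char := "ABCDEFGHIJKLMNOPQRSTUVWXYZ".toList

def rotP (ch : Char) (n : Int) : Char :=
  if alphabetLower.contains ch then
    Char.ofNat (PySem.Int.mod ((ch.toNat : Int) - 97 + n) 26 + 97).toNat
  else if alphabetUpper.contains ch then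
    Char.ofNat (PySem.Int.mod ((ch.toNat : Int) - 65 + n) 26 + 65).toNat
  else ch

-- port of to_number_key; the `getD` defaults are unreachable in every call autokey makes
def toNumberKeyA (text key : List Char) : List Int :=
  let lowerKey := key.map PySem.Chars.lowerChar
  (List.range text.length).map (fun i =>
    ((lowerKey.getD (i % lowerKey.length) 'a').toNat : Int) - 97)

-- port of vigenere, str-key branch (autokey only calls it with a str key and arg = "encode";
-- the final `else 0` is Python's NameError branch, unreachable here)
def vigenereA (text key : List Char) (arg : String) : List Char :=
  let k := key.map PySem.Chars.lowerChar
  let numberKey := (List.range text.length).map (fun i =>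
    ((k.getD (i % k.length) 'a').toNat : Int) - 97)
  (List.range text.length).map (fun i =>
    let encry : Int :=
      if arg = "encode" then numberKey.getD i 0
      else if arg = "decode" then -(numberKey.getD i 0) else 0
    rotP (text.getD i ' ') encry)

-- A's decode loop: number_key[0] on an empty key raises IndexError → none
def decodeLoopA (numberKey : List Int) (cs : List Char) (acc : List Char) : Option (List Char) :=
  match cs with
  | [] => some acc
  | c :: rest =>
    match numberKey with
    | [] => none
    | k :: _ =>
      let current := rotP c (-k)
      decodeLoopA ((numberKey ++ [(toNumberKeyA [current] [current]).headD 0]).tail)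
        rest (acc ++ [current])

def autokey (text : String) (key : String) (arg : String) : Option String :=
  if arg = "encode" then
    some (String.ofList (vigenereA text.toList (key.toList ++ text.toList) arg))
  else if arg = "decode" then
    (decodeLoopA (toNumberKeyA key.toList key.toList) text.toList []).map String.ofList
  else none

-- ===== PORT B =====
def valB (c : Char) : Int := ((PySem.Chars.lowerChar c).toNat : Int) - 97

-- one streaming loop: pop the front keystream shift, rotate, push the plaintext char's value
def streamB (enc : Bool) (queue : List Int) (cs : List Char) (out : List Char) :
    Option (List Char) :=
  match cs with
  | [] => some out
  | c :: rest =>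
    let q1 := if enc then queue ++ [valB c] else queue
    match q1 with
    | [] => none   -- queue.pop(0) on empty queue raises IndexError
    | k :: qrest =>
      let p := rotP c (if enc then k else -k)
      let q2 := if enc then qrest else qrest ++ [valB p]
      streamB enc q2 rest (out ++ [p])

def autokey_alt (text : String) (key : String) (arg : String) : Option String :=
  if arg ≠ "encode" ∧ arg ≠ "decode" then none
  else
    (streamB (arg = "encode") ((key.toList.map PySem.Chars.lowerChar).map (fun c => ((c.toNat : Int) - 97)))
      text.toList []).map String.ofList

-- ===== PRECONDITION & SPEC =====
-- Pre_ excludes decoding a nonempty text with an empty key, where Python A raises IndexError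
-- (number_key[0] on the empty keystream); B's queue.pop(0) raises there too.
def Pre_autokey (text : String) (key : String) (arg : String) : Prop :=
  ¬ (arg = "decode" ∧ key = "" ∧ text ≠ "")
instance (text : String) (key : String) (arg : String) : Decidable (Pre_autokey text key arg) := by
  unfold Pre_autokey; infer_instance

def pvWitness_autokey : String × String × String := ("Attack at dawn!", "queen", "decode")

def Spec_autokey (text : String) (key : String) (arg : String) (out : Option String) : Prop :=
  out = autokey_alt text key arg
instance (text : String) (key : String) (arg : String) (out : Option String) :
    Decidable (Spec_autokey text key arg out) := by unfold Spec_autokey; infer_instance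

-- ===== CLAIM (what is proved, stated in full; the proofs are below) =====
def Claim_equal_autokey : Prop := ∀ (text : String) (key : String) (arg : String),
  Dom_autokey text key arg → Pre_autokey text key arg →
  Spec_autokey text key arg (autokey text key arg)

-- ===== LEMMAS AND PROOFS =====

theorem toNumberKeyA_self (K : List Char) :
    toNumberKeyA K K = K.map valB := by
  unfold toNumberKeyA
  apply List.ext_getElem
  · simp
  · intro i h1 h2
    simp only [List.getElem_map, List.getElem_range]
    have hi : i < K.length := by simpa using h1
    rw [Nat.mod_eq_of_lt (by simpa using hi),
        List.getD_eq_getElem _ 'a' (by simpa using hi)]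
    simp [valB]

theorem streamB_enc_nil (c : Char) (rest acc : List Char) :
    streamB true [] (c :: rest) acc = streamB true [] rest (acc ++ [rotP c (valB c)]) := rfl

theorem streamB_enc_cons (v : Int) (vs : List Int) (c : Char) (rest acc : List Char) :
    streamB true (v :: vs) (c :: rest) acc
      = streamB true (vs ++ [valB c]) rest (acc ++ [rotP c v]) := rfl

theorem streamB_dec_cons (k : Int) (ks : List Int) (c : Char) (rest acc : List Char) :
    streamB false (k :: ks) (c :: rest) acc
      = streamB false (ks ++ [valB (rotP c (-k))]) rest (acc ++ [rotP c (-k)]) := rfl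

theorem decodeLoopA_eq_streamB (T : List Char) (Q : List Int) (acc : List Char) :
    decodeLoopA Q T acc = streamB false Q T acc := by
  induction T generalizing Q acc with
  | nil => rfl
  | cons c rest ih =>
    cases Q with
    | nil => rfl
    | cons k ks =>
      have h3 : (toNumberKeyA [rotP c (-k)] [rotP c (-k)]).headD 0 = valB (rotP c (-k)) := by
        rw [toNumberKeyA_self]; rfl
      show decodeLoopA (ks ++ [(toNumberKeyA [rotP c (-k)] [rotP c (-k)]).headD 0])
            rest (acc ++ [rotP c (-k)])
          = streamB false (k :: ks) (c :: rest) acc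
      rw [h3, streamB_dec_cons, ih]

theorem streamB_encode (T Q acc : List Char) :
    streamB true (Q.map valB) T acc =
      some (acc ++ List.zipWith (fun c k => rotP c (valB k)) T (Q ++ T)) := by
  induction T generalizing Q acc with
  | nil => simp [streamB]
  | cons c rest ih =>
    cases Q with
    | nil =>
      rw [List.map_nil, streamB_enc_nil]
      have := ih [] (acc ++ [rotP c (valB c)])
      simp only [List.map_nil, List.nil_append] at this ⊢
      rw [this]
      simp
    | cons q qs =>
      rw [List.map_cons, streamB_enc_cons]
      have := ih (qs ++ [c]) (acc ++ [rotP c (valB q)])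
      simp only [List.map_append, List.map_cons, List.map_nil] at this
      rw [this]
      simp [List.append_assoc]

theorem vigenereA_encode (T K : List Char) (h : T.length ≤ K.length) :
    vigenereA T K "encode" = List.zipWith (fun c k => rotP c (valB k)) T K := by
  unfold vigenereA
  apply List.ext_getElem
  · simp [Nat.min_eq_left h]
  · intro i h1 h2
    have h1' : i < T.length := by simpa using h1
    have hik : i < K.length := lt_of_lt_of_le h1' h
    simp only [List.getElem_map, List.getElem_range, List.getElem_zipWith, reduceIte]
    rw [List.getD_eq_getElem _ 0 (by simpa using h1'),
        List.getD_eq_getElem _ ' ' h1']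
    simp only [List.getElem_map, List.getElem_range]
    rw [Nat.mod_eq_of_lt (by simpa using hik),
        List.getD_eq_getElem _ 'a' (by simpa using hik)]
    simp [valB]

-- ===== VERDICT (by name: the statement is the Claim_ definition above) =====
theorem autokey_spec : Claim_equal_autokey := by
  intro text key arg _ _
  unfold Spec_autokey autokey autokey_alt
  have hmap : (key.toList.map PySem.Chars.lowerChar).map (fun c => ((c.toNat : Int) - 97))
      = key.toList.map valB := by simp [valB]
  by_cases he : arg = "encode"
  · subst he
    rw [if_pos rfl, if_neg (by simp)]
    have hb : (decide (("encode" : String) = "encode")) = true := by decide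
    rw [hb, hmap, streamB_encode,
        vigenereA_encode text.toList (key.toList ++ text.toList) (by simp)]
    simp
  · by_cases hd : arg = "decode"
    · subst hd
      rw [if_neg (by decide), if_pos rfl, if_neg (by simp)]
      have hb : (decide (("decode" : String) = "encode")) = false := by decide
      rw [hb, hmap, toNumberKeyA_self, decodeLoopA_eq_streamB]
    · rw [if_neg he, if_neg hd, if_pos ⟨he, hd⟩]
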